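-- pv_equiv track=rewrite | github.com/JWBB1508/AdventOfCode | 2020/src/14.py | get_addresses_from_base
-- ===== SOURCE A (Python) =====
-- def get_addresses_from_base(address):
--     addresses = set()
--     x_count = 0
--     x_indices = []
--     for i, char in enumerate(address):
--         if char == "X":
--             x_count += 1
--             x_indices.append(i)
--     for value in range(2 ** x_count):
--         temp_address = list(address)
--         value_str = list(bin(value)[2:])
--         value_str = ["0"] * (x_count - len(value_str)) + value_str
--         for i, char in enumerate(value_str):
--             temp_address[x_indices[i]] = char
--         addresses.add("".join(temp_address))
--     return addresses
-- ===== SOURCE B (Python) =====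
-- def get_addresses_from_base(address):
--     # Recursive expansion over the string: branch on each 'X' structurally
--     # (no x_indices list, no 2**k enumeration, no bin() conversion).
--     def expand(i):
--         if i == len(address):
--             return ['']
--         rest = expand(i + 1)
--         c = address[i]
--         if c == 'X':
--             return ['0' + r for r in rest] + ['1' + r for r in rest]
--         return [c + r for r in rest]
--     return set(expand(0))
-- ===== Notes on version B (the rewrite author's own statement) =====
-- stated objective: alternative
-- what changed: B replaces A's enumeration of all 2**x_count integers with bin() conversion, zero-padding and positional writes at x_indices by a structural recursion over the string that branches into '0'/'1' at each 'X', sharing the expanded suffixes.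
-- outside the precondition, e.g. on get_addresses_from_base('0'): A raises IndexError, B returns {'0'}
import Mathlib
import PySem

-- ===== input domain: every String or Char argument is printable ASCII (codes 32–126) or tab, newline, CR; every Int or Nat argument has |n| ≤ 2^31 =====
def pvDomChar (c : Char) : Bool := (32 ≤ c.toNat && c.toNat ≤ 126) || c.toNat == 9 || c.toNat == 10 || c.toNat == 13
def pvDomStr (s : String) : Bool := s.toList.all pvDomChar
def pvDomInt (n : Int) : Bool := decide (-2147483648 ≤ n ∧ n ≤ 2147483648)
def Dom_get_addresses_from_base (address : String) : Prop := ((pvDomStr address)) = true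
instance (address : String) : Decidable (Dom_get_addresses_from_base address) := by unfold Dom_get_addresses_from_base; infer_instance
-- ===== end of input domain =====

-- B replaces A's 2^k integer enumeration (bin() + padding + positional writes) by a
-- structural recursion over the string branching '0'/'1' at each 'X'; same result set.

-- ===== PORT A =====
-- bin(n) for n ≥ 1, without the '0b' prefix (binary digits, most significant first)
def binNat : Nat → List Char
  | 0 => []
  | n+1 => binNat ((n+1)/2) ++ [if (n+1) % 2 = 1 then '1' else '0']
decreasing_by exact Nat.div_lt_self (Nat.succ_pos n) (by norm_num)

-- bin(v)[2:]; exact for v ≥ 0, the only values range(2**x_count) produces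
def pyBin (v : Int) : List Char := if v = 0 then ['0'] else binNat v.toNat

def get_addresses_from_base (address : String) : List String :=
  let chars := address.toList
  -- first loop: count the 'X's and record their indices
  let st := (PySem.List.enumerate chars).foldl
      (fun (st : Int × List Int) p => if p.2 = 'X' then (st.1 + 1, st.2 ++ [p.1]) else st) (0, [])
  let x_count := st.1
  let x_indices := st.2
  -- second loop: for value in range(2 ** x_count)  (x_count ≥ 0 always, so toNat is exact)
  (PySem.List.pyRange 0 ((2:Int) ^ x_count.toNat) 1).foldl
    (fun (addresses : PySem.Set String) value =>
      let value_str0 := pyBin value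
      -- ["0"] * (x_count - len(value_str)) + value_str  (negative repeat count = empty, as toNat)
      let value_str := List.replicate (x_count - (value_str0.length : Int)).toNat '0' ++ value_str0
      -- temp_address[x_indices[i]] = char; total pyGetD/pySetD forms: under Pre_ every
      -- access is in range (Python raises outside Pre_, where A is not claimed)
      let temp := (PySem.List.enumerate value_str).foldl
          (fun t p => PySem.List.pySetD t (PySem.List.pyGetD x_indices p.1 0) p.2) chars
      PySem.Set.add addresses (String.ofList temp))
    PySem.Set.empty

-- ===== PORT B =====
-- expand(i) of Source B: list of expansions of the suffix, '0' branch before '1' branch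
def expandB : List Char → List (List Char)
  | [] => [[]]
  | c :: cs =>
    let rest := expandB cs
    if c = 'X' then rest.map (fun r => '0' :: r) ++ rest.map (fun r => '1' :: r)
    else rest.map (fun r => c :: r)

def get_addresses_from_base_alt (address : String) : List String :=
  PySem.Set.ofList ((expandB address.toList).map String.ofList)

-- ===== PRECONDITION & SPEC =====
-- Pre_ excludes exactly the addresses with no 'X': there A's inner loop evaluates
-- x_indices[0] on the empty x_indices list and raises IndexError.
def Pre_get_addresses_from_base (address : String) : Prop := 'X' ∈ address.toList
instance (address : String) : Decidable (Pre_get_addresses_from_base address) := by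
  unfold Pre_get_addresses_from_base; infer_instance

def pvWitness_get_addresses_from_base : String := "1X0X"

def Spec_get_addresses_from_base (address : String) (out : List String) : Prop :=
  out = get_addresses_from_base_alt address
instance (address : String) (out : List String) : Decidable (Spec_get_addresses_from_base address out) := by
  unfold Spec_get_addresses_from_base; infer_instance

-- ===== CLAIM (what is proved, stated in full; the proofs are below) =====
def Claim_equal_get_addresses_from_base : Prop := ∀ (address : String),
  Dom_get_addresses_from_base address → Pre_get_addresses_from_base address →
  Spec_get_addresses_from_base address (get_addresses_from_base address)

-- ===== LEMMAS AND PROOFS =====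

-- number of 'X's in a char list
def countX : List Char → Nat
  | [] => 0
  | c :: cs => (if c = 'X' then 1 else 0) + countX cs

-- indices of the 'X's, counting from s
def xIdx : List Char → Int → List Int
  | [], _ => []
  | c :: cs, s => if c = 'X' then s :: xIdx cs (s+1) else xIdx cs (s+1)

-- v written as exactly k binary digits, most significant first (for v < 2^k)
def padBits : Nat → Nat → List Char
  | 0, _ => []
  | k+1, v => padBits k (v/2) ++ [if v % 2 = 1 then '1' else '0']

-- substitute the successive 'X's of cs by the successive chars of bs
def substX : List Char → List Char → List Char
  | [], _ => []
  | c :: cs, bs => if c = 'X' then bs.headD 'X' :: substX cs bs.tail else c :: substX cs bs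

theorem length_padBits (k v : Nat) : (padBits k v).length = k := by
  induction k generalizing v with
  | zero => rfl
  | succ k ih => simp [padBits, ih]

theorem padBits_zero (k : Nat) : padBits k 0 = List.replicate k '0' := by
  induction k with
  | zero => rfl
  | succ k ih => simp [padBits, ih, List.replicate_succ' (n := k)]

theorem padBits_msb (k v : Nat) (h : v < 2^(k+1)) :
    padBits (k+1) v = (if 2^k ≤ v then '1' else '0') :: padBits k (v % 2^k) := by
  induction k generalizing v with
  | zero => interval_cases v <;> decide
  | succ k ih =>
    have hp : 2^(k+1+1) = 2^(k+1) * 2 := pow_succ 2 (k+1)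
    have h2 : v / 2 < 2^(k+1) := by omega
    have e1 : (2^k ≤ v / 2) = (2^(k+1) ≤ v) := by
      rw [pow_succ]
      exact propext (Nat.le_div_iff_mul_le Nat.zero_lt_two)
    have e2 : v / 2 % 2^k = v % 2^(k+1) / 2 := by
      rw [pow_succ']
      exact (Nat.mod_mul_right_div_self v 2 (2^k)).symm
    have e3 : v % 2 = v % 2^(k+1) % 2 := by
      rw [pow_succ']
      exact (Nat.mod_mul_right_mod v 2 (2^k)).symm
    have lhs : padBits (k+1+1) v = padBits (k+1) (v/2) ++ [if v % 2 = 1 then '1' else '0'] := rfl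
    have rhs : padBits (k+1) (v % 2^(k+1)) =
        padBits k (v % 2^(k+1) / 2) ++ [if v % 2^(k+1) % 2 = 1 then '1' else '0'] := rfl
    rw [lhs, rhs, ih _ h2, ← e2, ← e3]
    simp only [List.cons_append]
    congr 1
    simp only [e1]

-- pyBin on a Nat-cast argument
theorem pyBin_natCast (v : Nat) : pyBin (v : Int) = if v = 0 then ['0'] else binNat v := by
  simp [pyBin]

theorem binNat_one : binNat 1 = ['1'] := by
  rw [binNat]; norm_num; rw [binNat]

theorem pad_bin (k v : Nat) (hk : 1 ≤ k) (hv : v < 2^k) :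
    List.replicate (k - (pyBin (v:Int)).length) '0' ++ pyBin (v:Int) = padBits k v := by
  rw [pyBin_natCast]
  induction k generalizing v with
  | zero => omega
  | succ k ih =>
    match k, ih with
    | 0, _ =>
      interval_cases v
      · simp [padBits]
      · simp [binNat_one, padBits]
    | k+1, ih =>
      match v with
      | 0 => simp [padBits_zero, List.replicate_succ' (n := k+1)]
      | 1 =>
        have hpb : padBits (k+1+1) 1 = padBits (k+1) 0 ++ ['1'] := rfl
        simp [binNat_one, hpb, padBits_zero, List.replicate_succ' (n := k+1)]
      | v+2 =>
        have hp : 2^(k+1+1) = 2^(k+1) * 2 := pow_succ 2 (k+1)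
        have hq : (v+2)/2 < 2^(k+1) := by omega
        have hq1 : (v+2)/2 ≠ 0 := by omega
        have hstep : binNat (v+2) = binNat ((v+2)/2) ++ [if (v+2) % 2 = 1 then '1' else '0'] := by
          rw [binNat]
        have ihq := ih ((v+2)/2) (by omega) hq
        rw [if_neg hq1] at ihq
        have hlen : (binNat (v+2)).length = (binNat ((v+2)/2)).length + 1 := by
          rw [hstep]; simp
        have hne : (v+2) ≠ 0 := by omega
        rw [if_neg hne]
        calc List.replicate (k+1+1 - (binNat (v+2)).length) '0' ++ binNat (v+2)
            = List.replicate (k+1 - (binNat ((v+2)/2)).length) '0' ++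
                (binNat ((v+2)/2) ++ [if (v+2) % 2 = 1 then '1' else '0']) := by
              rw [hlen,
                show k+1+1 - ((binNat ((v+2)/2)).length + 1) = k+1 - (binNat ((v+2)/2)).length
                  from by omega]
              conv_lhs => rw [hstep]
          _ = (List.replicate (k+1 - (binNat ((v+2)/2)).length) '0' ++ binNat ((v+2)/2))
                ++ [if (v+2) % 2 = 1 then '1' else '0'] := by rw [List.append_assoc]
          _ = padBits (k+1) ((v+2)/2) ++ [if (v+2) % 2 = 1 then '1' else '0'] := by rw [ihq]
          _ = padBits (k+1+1) (v+2) := rfl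

theorem expandB_eq (cs : List Char) :
    expandB cs = (List.range (2^(countX cs))).map
      (fun v => substX cs (padBits (countX cs) v)) := by
  induction cs with
  | nil => decide
  | cons c cs ih =>
    by_cases hc : c = 'X'
    · subst hc
      have hk : countX ('X' :: cs) = countX cs + 1 := by simp [countX]; omega
      rw [hk]
      have hsplit : List.range (2^(countX cs + 1)) =
          List.range (2^(countX cs)) ++ (List.range (2^(countX cs))).map (fun v => 2^(countX cs) + v) := by
        rw [pow_succ, Nat.mul_two, List.range_add]
      rw [hsplit, List.map_append, List.map_map]
      have he : expandB ('X' :: cs) =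
          (expandB cs).map (fun r => '0' :: r) ++ (expandB cs).map (fun r => '1' :: r) := by
        simp [expandB]
      rw [he, ih, List.map_map, List.map_map]
      congr 1
      · apply List.map_congr_left
        intro v hv
        have hv' : v < 2^(countX cs) := List.mem_range.mp hv
        have := padBits_msb (countX cs) v (by have := hv'; omega)
        simp only [Function.comp_apply, this, if_neg (by omega : ¬ 2^(countX cs) ≤ v),
          Nat.mod_eq_of_lt hv']
        simp [substX]
      · apply List.map_congr_left
        intro v hv
        have hv' : v < 2^(countX cs) := List.mem_range.mp hv
        have hlt : 2^(countX cs) + v < 2^(countX cs + 1) := by rw [pow_succ]; omega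
        have := padBits_msb (countX cs) (2^(countX cs) + v) hlt
        simp only [Function.comp_apply, this, if_pos (by omega : 2^(countX cs) ≤ 2^(countX cs) + v),
          Nat.add_mod_left, Nat.mod_eq_of_lt hv']
        simp [substX]
    · have hk : countX (c :: cs) = countX cs := by simp [countX, hc]
      rw [hk]
      have he : expandB (c :: cs) = (expandB cs).map (fun r => c :: r) := by
        simp [expandB, hc]
      rw [he, ih, List.map_map]
      apply List.map_congr_left
      intro v hv
      simp [substX, hc]

theorem loop1 (cs : List Char) (s : Int) (acc : Int × List Int) :
    (PySem.List.enumerate cs s).foldl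
      (fun (st : Int × List Int) p => if p.2 = 'X' then (st.1 + 1, st.2 ++ [p.1]) else st) acc
    = (acc.1 + countX cs, acc.2 ++ xIdx cs s) := by
  induction cs generalizing s acc with
  | nil => simp [PySem.List.enumerate_nil, countX, xIdx]
  | cons c cs ih =>
    rw [PySem.List.enumerate_cons, List.foldl_cons, ih]
    by_cases hc : c = 'X'
    · subst hc
      simp [countX, xIdx, Prod.ext_iff, List.append_assoc]
      omega
    · simp [countX, xIdx, hc, Prod.ext_iff]

theorem enumerate_succ_map {α : Type} (xs : List α) (s : Int) :
    PySem.List.enumerate xs (s+1) = (PySem.List.enumerate xs s).map (fun p => (p.1 + 1, p.2)) := by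
  induction xs generalizing s with
  | nil => simp [PySem.List.enumerate_nil]
  | cons x xs ih => rw [PySem.List.enumerate_cons, PySem.List.enumerate_cons, List.map_cons, ← ih]

theorem set_append_len {α : Type} (l₁ l₂ : List α) (a : α) :
    (l₁ ++ l₂).set l₁.length a = l₁ ++ l₂.set 0 a := by
  induction l₁ with
  | nil => rfl
  | cons x l₁ ih => simp [List.set, ih]

theorem loop3 (cs bits done : List Char) (h : bits.length = countX cs) :
    (PySem.List.enumerate bits 0).foldl
      (fun t p => PySem.List.pySetD t (PySem.List.pyGetD (xIdx cs (done.length : Int)) p.1 0) p.2)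
      (done ++ cs) = done ++ substX cs bits := by
  induction cs generalizing bits done with
  | nil =>
    have : bits = [] := List.eq_nil_of_length_eq_zero (by simpa [countX] using h)
    subst this
    simp [PySem.List.enumerate_nil, substX]
  | cons c cs ih =>
    by_cases hc : c = 'X'
    · subst hc
      have hk : countX ('X' :: cs) = countX cs + 1 := by simp [countX]; omega
      match bits with
      | [] => rw [hk] at h; simp at h
      | b :: bs =>
        have hbs : bs.length = countX cs := by rw [hk] at h; simpa using h
        rw [PySem.List.enumerate_cons, List.foldl_cons]
        have hx : xIdx ('X' :: cs) (done.length : Int) =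
            (done.length : Int) :: xIdx cs ((done.length : Int) + 1) := by simp [xIdx]
        have hget0 : PySem.List.pyGetD (xIdx ('X' :: cs) (done.length : Int)) 0 0 = (done.length : Int) := by
          rw [hx]; simp [PySem.List.pyGetD, PySem.List.pyGet?, PySem.List.pyIdx?]
        have hset : PySem.List.pySetD (done ++ 'X' :: cs) (done.length : Int) b = done ++ b :: cs := by
          rw [PySem.List.pySetD_natCast, set_append_len]
          rfl
        rw [hget0, hset]
        rw [show (0:Int) + 1 = 0 + 1 from rfl, enumerate_succ_map, List.foldl_map]
        rw [List.foldl_ext _ (fun t (p : Int × Char) =>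
              PySem.List.pySetD t (PySem.List.pyGetD (xIdx cs ((done.length : Int) + 1)) p.1 0) p.2)
            (done ++ b :: cs)
            (by
              intro acc p hp
              rcases (PySem.List.mem_enumerate_iff _ _ _).mp hp with ⟨i, hi, rfl⟩
              show PySem.List.pySetD acc
                  (PySem.List.pyGetD (xIdx ('X' :: cs) (done.length : Int)) ((0 + (i:Int)) + 1) 0) _ = _
              have h1 : ((0:Int) + (i:Int)) + 1 = ((i+1 : Nat) : Int) := by push_cast; ring
              have h1' : ((0:Int) + (i:Int)) = ((i : Nat) : Int) := by push_cast; ring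
              rw [hx, h1, PySem.List.pyGetD_natCast, List.getD_cons_succ,
                ← PySem.List.pyGetD_natCast, h1'])]
        have := ih bs (done ++ [b]) hbs
        rw [List.append_assoc] at this
        simp only [List.singleton_append, List.length_append, List.length_cons, List.length_nil,
          Nat.cast_add, Nat.cast_one, Nat.cast_zero, Nat.cast_ofNat, zero_add] at this
        rw [this]
        simp [substX]
    · have hk : countX (c :: cs) = countX cs := by simp [countX, hc]
      have hx : xIdx (c :: cs) (done.length : Int) = xIdx cs ((done.length : Int) + 1) := by
        simp [xIdx, hc]
      rw [hx]
      have := ih bits (done ++ [c]) (by rw [hk] at h; exact h)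
      rw [List.append_assoc] at this
      simp only [List.singleton_append, List.length_append, List.length_cons, List.length_nil,
        Nat.cast_add, Nat.cast_one, Nat.cast_zero, Nat.cast_ofNat, zero_add] at this
      rw [this]
      simp [substX, hc]

theorem countX_pos {cs : List Char} (h : 'X' ∈ cs) : 1 ≤ countX cs := by
  induction cs with
  | nil => simp at h
  | cons c cs ih =>
    rcases List.mem_cons.mp h with h | h
    · simp [countX, ← h]
    · have := ih h; unfold countX; split <;> omega

theorem get_addresses_from_base_spec : Claim_equal_get_addresses_from_base := by
  intro address hdom hpre
  unfold Spec_get_addresses_from_base get_addresses_from_base get_addresses_from_base_alt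
  set cs := address.toList with hcs
  have hk1 : 1 ≤ countX cs := countX_pos hpre
  simp only []
  rw [loop1 cs 0 (0, [])]
  simp only [Int.zero_add, List.nil_append, Int.toNat_natCast]
  have hcast : (2:Int) ^ countX cs = ((2 ^ countX cs : Nat) : Int) := by push_cast; rfl
  rw [hcast, PySem.List.pyRange_zero_nat, List.foldl_map]
  rw [List.foldl_ext _ (fun (acc : PySem.Set String) (v : Nat) =>
        PySem.Set.add acc (String.ofList (substX cs (padBits (countX cs) v)))) _ (by
      intro acc v hv
      have hvlt : v < 2 ^ countX cs := List.mem_range.mp hv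
      congr 1
      congr 1
      have hpad : List.replicate (((countX cs : Int)) - ((pyBin (v:Int)).length : Int)).toNat '0'
          ++ pyBin (v:Int) = padBits (countX cs) v := by
        rw [show (((countX cs : Int)) - ((pyBin (v:Int)).length : Int)).toNat
            = countX cs - (pyBin (v:Int)).length from by omega]
        exact pad_bin (countX cs) v hk1 hvlt
      rw [hpad]
      have := loop3 cs (padBits (countX cs) v) [] (length_padBits _ _)
      simpa using this)]
  rw [expandB_eq, List.map_map]
  conv_rhs => rw [PySem.Set.ofList_eq_foldl, List.foldl_map]
  rfl
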